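-- pv_equiv track=rewrite | github.com/materialsproject/pymatgen | src/pymatgen/io/jdftx/inputs.py | _gather_tags
-- ===== SOURCE A (Python) =====
-- def _gather_tags(lines: list[str]) -> list[str]:
--     """Gather broken lines into single string for processing later.
--
--     Args:
--         lines (list[str]): List of lines from the input file.
--
--     Returns:
--         list[str]: List of strings with tags broken across lines combined into single string.
--     """
--     total_tag = ""
--     gathered_strings = []
--     for line in lines:
--         if line[-1] == "\\":  # "\" indicates line continuation (the first "\" needed to be escaped)
--             total_tag += line[:-1].strip() + " "  # remove \ and any extra whitespace
--         elif total_tag:  # then finished with line continuations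
--             total_tag += line
--             gathered_strings.append(total_tag)
--             total_tag = ""
--         else:  # then append line like normal
--             gathered_strings.append(line)
--     return gathered_strings
-- ===== SOURCE B (Python) =====
-- def _gather_tags(lines: list[str]) -> list[str]:
--     """Gather broken lines into single string for processing later.
--
--     Index-driven rewrite: each backslash-continuation block is consumed as a
--     unit by an inner while-loop, instead of carrying accumulator state across
--     a flat loop.
--     """
--     out = []
--     i = 0
--     n = len(lines)
--     while i < n:
--         if lines[i][-1] == "\\":
--             combined = ""
--             while i < n and lines[i][-1] == "\\":
--                 combined += lines[i][:-1].strip() + " "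
--                 i += 1
--             if i < n:  # terminator line appended verbatim
--                 out.append(combined + lines[i])
--                 i += 1
--             # an unterminated trailing continuation block is dropped
--         else:
--             out.append(lines[i])
--             i += 1
--     return out
-- ===== Notes on version B (the rewrite author's own statement) =====
-- stated objective: alternative
-- what changed: Replaces the flat for-loop carrying a cross-iteration accumulator string with an index-driven outer while-loop whose inner while-loop consumes each backslash-continuation block as a unit.
import Mathlib
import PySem

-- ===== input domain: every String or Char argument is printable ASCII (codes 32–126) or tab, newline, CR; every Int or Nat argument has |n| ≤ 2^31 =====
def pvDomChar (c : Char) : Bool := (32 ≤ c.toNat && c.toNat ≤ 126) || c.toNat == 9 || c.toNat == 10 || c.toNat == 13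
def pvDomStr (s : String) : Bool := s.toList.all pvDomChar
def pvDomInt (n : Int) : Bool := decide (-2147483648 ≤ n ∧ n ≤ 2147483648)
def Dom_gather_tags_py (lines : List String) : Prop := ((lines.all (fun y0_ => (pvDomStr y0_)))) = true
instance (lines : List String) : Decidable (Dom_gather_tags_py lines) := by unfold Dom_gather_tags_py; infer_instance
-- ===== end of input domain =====

-- B consumes each backslash-continuation block with a nested loop instead of A's
-- flat loop with a cross-iteration accumulator; same result, same cost (objective: alternative).


-- ===== PORT A =====
-- one iteration of A's for-loop; state = (total_tag, gathered_strings)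
def gatherStepA (st : String × List String) (line : String) : String × List String :=
  if PySem.Str.pyGet? line (-1) = some '\\' then
    (st.1 ++ PySem.Str.strip (PySem.Str.slice line none (some (-1))) ++ " ", st.2)
  else if st.1 ≠ "" then
    ("", st.2 ++ [st.1 ++ line])
  else
    (st.1, st.2 ++ [line])

def gather_tags_py (lines : List String) : List String :=
  (lines.foldl gatherStepA ("", [])).2

-- ===== PORT B =====
-- B's inner while-loop (consume a continuation run) and outer while-loop, as mutual recursion
mutual
  def gatherRunB (acc : String) : List String → List String
    | [] => []  -- unterminated trailing continuation block: dropped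
    | l :: rest =>
        if PySem.Str.pyGet? l (-1) = some '\\' then
          gatherRunB (acc ++ PySem.Str.strip (PySem.Str.slice l none (some (-1))) ++ " ") rest
        else
          (acc ++ l) :: gatherGoB rest
  def gatherGoB : List String → List String
    | [] => []
    | l :: rest =>
        if PySem.Str.pyGet? l (-1) = some '\\' then
          gatherRunB (PySem.Str.strip (PySem.Str.slice l none (some (-1))) ++ " ") rest
        else
          l :: gatherGoB rest
end

def gather_tags_py_alt (lines : List String) : List String :=
  gatherGoB lines

-- ===== PRECONDITION & SPEC =====
-- Pre_ excludes lists containing an empty string: there line[-1] raises IndexError in A (and in B).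
def Pre_gather_tags_py (lines : List String) : Prop := ∀ s ∈ lines, s ≠ ""
instance (lines : List String) : Decidable (Pre_gather_tags_py lines) := by unfold Pre_gather_tags_py; infer_instance
def pvWitness_gather_tags_py : List String := ["a \\", "b", "c"]

def Spec_gather_tags_py (lines : List String) (out : List String) : Prop := out = gather_tags_py_alt lines
instance (lines : List String) (out : List String) : Decidable (Spec_gather_tags_py lines out) := by unfold Spec_gather_tags_py; infer_instance

-- ===== CLAIM (what is proved, stated in full; the proofs are below) =====
def Claim_equal_gather_tags_py : Prop := ∀ (lines : List String), Dom_gather_tags_py lines → Pre_gather_tags_py lines → Spec_gather_tags_py lines (gather_tags_py lines)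

-- ===== LEMMAS AND PROOFS =====

lemma append_space_ne_empty (s : String) : s ++ " " ≠ "" := by
  intro h
  have := congrArg String.length h
  simp [String.length_append] at this

-- Loop invariant: A's fold from state (t, g) yields g ++ (B in the matching mode):
-- t = "" ↔ not inside a continuation run.
lemma gather_key (ls : List String) : ∀ (t : String) (g : List String),
    (List.foldl gatherStepA (t, g) ls).2
      = g ++ (if t = "" then gatherGoB ls else gatherRunB t ls) := by
  induction ls with
  | nil =>
    intro t g
    by_cases ht : t = "" <;> simp [ht, gatherGoB, gatherRunB]
  | cons l rest ih =>
    intro t g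
    by_cases hc : PySem.List.pyGet? l.toList (-1) = some '\\'
    · have hne : t ++ PySem.Str.strip (PySem.Str.slice l none (some (-1))) ++ " " ≠ "" :=
        append_space_ne_empty (t ++ PySem.Str.strip (PySem.Str.slice l none (some (-1))))
      by_cases ht : t = ""
      · simp [ht, gatherStepA, hc, gatherGoB, ih]
      · simp [ht, gatherStepA, hc, gatherRunB, ih, hne]
    · by_cases ht : t = ""
      · simp [ht, gatherStepA, hc, gatherGoB, ih]
      · simp [ht, gatherStepA, hc, gatherRunB, ih]

-- ===== VERDICT (by name: the statement is the Claim_ definition above) =====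
theorem gather_tags_py_spec : Claim_equal_gather_tags_py := by
  intro lines _ _
  unfold Spec_gather_tags_py gather_tags_py gather_tags_py_alt
  simpa using gather_key lines "" []
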